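-- pv_equiv track=rewrite | github.com/fvazquezf/rp-taxi | encode.py | generate_facts
-- ===== SOURCE A (Python) =====
-- def generate_facts(rows, cols, grid):
--     """
--     Generates ASP facts based on the grid content.
--     """
--     facts = []
--
--     # 1. Domain Dimensions
--     facts.append(f"% Grid Dimensions")
--     facts.append(f"row(1..{rows}).")
--     facts.append(f"col(1..{cols}).")
--     facts.append("")
--
--     # 2. Static Elements (Walls and Stations)
--     walls = []
--     stations = []
--
--     # 3. Dynamic Elements (Taxis and Passengers)
--     # We use 'init' to wrap their starting positions.
--     taxis = []
--     passengers = []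
--
--     for r, line in enumerate(grid):
--         for c, char in enumerate(line):
--             # 1-based indexing for ASP
--             x, y = r + 1, c + 1
--
--             if char == '#':
--                 walls.append(f"wall({x},{y}).")
--             elif char == 'X':
--                 stations.append(f"station({x},{y}).")
--             elif 'a' <= char <= 'z':
--                 # It's a passenger
--                 passengers.append(f"passenger({char}).")
--                 passengers.append(f"init(passenger_at({char},{x},{y})).")
--             elif '1' <= char <= '9':
--                 # It's a taxi
--                 taxis.append(f"taxi({char}).")
--                 taxis.append(f"init(at({char},{x},{y})).")
--             # '.' is treated as empty space and ignored
--
--     # Append formatted sections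
--     if walls:
--         facts.append("% Walls")
--         facts.extend(walls)
--         facts.append("")
--
--     if stations:
--         facts.append("% Stations")
--         facts.extend(stations)
--         facts.append("")
--
--     if taxis:
--         facts.append("% Taxis")
--         facts.extend(taxis)
--         facts.append("")
--
--     if passengers:
--         facts.append("% Passengers")
--         facts.extend(passengers)
--         facts.append("")
--
--     return "\n".join(facts)
-- ===== SOURCE B (Python) =====
-- def generate_facts(rows, cols, grid):
--     """Same ASP facts, built section by section from a flat cell list."""
--     cells = [(r + 1, c + 1, ch)
--              for r, line in enumerate(grid)
--              for c, ch in enumerate(line)]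
--
--     walls = [f"wall({x},{y})." for x, y, ch in cells if ch == '#']
--     stations = [f"station({x},{y})." for x, y, ch in cells if ch == 'X']
--     taxis = [fact for x, y, ch in cells if '1' <= ch <= '9'
--              for fact in (f"taxi({ch}).", f"init(at({ch},{x},{y})).")]
--     passengers = [fact for x, y, ch in cells if 'a' <= ch <= 'z'
--                   for fact in (f"passenger({ch}).",
--                                f"init(passenger_at({ch},{x},{y})).")]
--
--     def section(title, items):
--         return [f"% {title}"] + items + [""] if items else []
--
--     lines = (["% Grid Dimensions", f"row(1..{rows}).", f"col(1..{cols}).", ""]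
--              + section("Walls", walls)
--              + section("Stations", stations)
--              + section("Taxis", taxis)
--              + section("Passengers", passengers))
--     return "\n".join(lines)
-- ===== Notes on version B (the rewrite author's own statement) =====
-- stated objective: alternative
-- what changed: Replaces A's single nested loop threading four accumulator lists with a flat cell list and one independent comprehension scan per output section (walls, stations, taxis, passengers), assembled via a section helper.
import Mathlib
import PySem

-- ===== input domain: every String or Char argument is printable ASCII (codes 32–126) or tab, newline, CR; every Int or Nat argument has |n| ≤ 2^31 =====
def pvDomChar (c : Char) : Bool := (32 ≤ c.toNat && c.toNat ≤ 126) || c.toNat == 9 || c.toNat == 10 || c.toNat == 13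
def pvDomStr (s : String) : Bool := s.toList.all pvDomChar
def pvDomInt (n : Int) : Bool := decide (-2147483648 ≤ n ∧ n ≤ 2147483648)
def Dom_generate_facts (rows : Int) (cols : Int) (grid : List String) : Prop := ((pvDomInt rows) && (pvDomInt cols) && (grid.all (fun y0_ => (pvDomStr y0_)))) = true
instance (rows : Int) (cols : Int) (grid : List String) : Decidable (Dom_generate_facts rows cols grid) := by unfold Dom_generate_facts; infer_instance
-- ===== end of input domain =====

-- B rebuilds each output section by its own scan of a flat cell list instead of A's
-- four accumulator lists threaded through one combined nested loop (objective: alternative decomposition).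

-- Fact strings (the f-string templates both Pythons share)
def pvWall (x y : Int) : String := "wall(" ++ PySem.Int.toStr x ++ "," ++ PySem.Int.toStr y ++ ")."
def pvStation (x y : Int) : String := "station(" ++ PySem.Int.toStr x ++ "," ++ PySem.Int.toStr y ++ ")."
def pvPassenger (ch : Char) : String := "passenger(" ++ String.singleton ch ++ ")."
def pvPassengerAt (ch : Char) (x y : Int) : String :=
  "init(passenger_at(" ++ String.singleton ch ++ "," ++ PySem.Int.toStr x ++ "," ++ PySem.Int.toStr y ++ "))."
def pvTaxi (ch : Char) : String := "taxi(" ++ String.singleton ch ++ ")."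
def pvTaxiAt (ch : Char) (x y : Int) : String :=
  "init(at(" ++ String.singleton ch ++ "," ++ PySem.Int.toStr x ++ "," ++ PySem.Int.toStr y ++ "))."

-- ===== PORT A =====
-- the body of A's combined loop: one cell updates the four accumulator lists
def pvCellStep (st : List String × List String × List String × List String)
    (x y : Int) (ch : Char) : List String × List String × List String × List String :=
  let (ws, ss, ts, ps) := st
  if ch = '#' then (ws ++ [pvWall x y], ss, ts, ps)
  else if ch = 'X' then (ws, ss ++ [pvStation x y], ts, ps)
  else if 'a' ≤ ch ∧ ch ≤ 'z' then (ws, ss, ts, ps ++ [pvPassenger ch, pvPassengerAt ch x y])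
  else if '1' ≤ ch ∧ ch ≤ '9' then (ws, ss, ts ++ [pvTaxi ch, pvTaxiAt ch x y], ps)
  else (ws, ss, ts, ps)

def generate_facts (rows : Int) (cols : Int) (grid : List String) : String :=
  let facts : List String :=
    ["% Grid Dimensions", "row(1.." ++ PySem.Int.toStr rows ++ ").",
     "col(1.." ++ PySem.Int.toStr cols ++ ").", ""]
  let st :=
    (PySem.List.enumerate grid).foldl (fun st rl =>
      (PySem.List.enumerate rl.2.toList).foldl
        (fun st cc => pvCellStep st (rl.1 + 1) (cc.1 + 1) cc.2) st)
      (([], [], [], []) : List String × List String × List String × List String)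
  let walls := st.1
  let stations := st.2.1
  let taxis := st.2.2.1
  let passengers := st.2.2.2
  let facts := if walls ≠ [] then facts ++ ["% Walls"] ++ walls ++ [""] else facts
  let facts := if stations ≠ [] then facts ++ ["% Stations"] ++ stations ++ [""] else facts
  let facts := if taxis ≠ [] then facts ++ ["% Taxis"] ++ taxis ++ [""] else facts
  let facts := if passengers ≠ [] then facts ++ ["% Passengers"] ++ passengers ++ [""] else facts
  PySem.Str.join "\n" facts

-- ===== PORT B =====
def pvCells (grid : List String) : List (Int × Int × Char) :=
  (PySem.List.enumerate grid).flatMap (fun rl =>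
    (PySem.List.enumerate rl.2.toList).map (fun cc => (rl.1 + 1, cc.1 + 1, cc.2)))

def pvSection (header : String) (items : List String) : List String :=
  if items ≠ [] then [header] ++ items ++ [""] else []

def generate_facts_alt (rows : Int) (cols : Int) (grid : List String) : String :=
  let cells := pvCells grid
  let walls := cells.filterMap (fun t => if t.2.2 = '#' then some (pvWall t.1 t.2.1) else none)
  let stations := cells.filterMap (fun t => if t.2.2 = 'X' then some (pvStation t.1 t.2.1) else none)
  let taxis := cells.flatMap (fun t =>
    if '1' ≤ t.2.2 ∧ t.2.2 ≤ '9' then [pvTaxi t.2.2, pvTaxiAt t.2.2 t.1 t.2.1] else [])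
  let passengers := cells.flatMap (fun t =>
    if 'a' ≤ t.2.2 ∧ t.2.2 ≤ 'z' then [pvPassenger t.2.2, pvPassengerAt t.2.2 t.1 t.2.1] else [])
  let lines :=
    ["% Grid Dimensions", "row(1.." ++ PySem.Int.toStr rows ++ ").",
     "col(1.." ++ PySem.Int.toStr cols ++ ").", ""]
    ++ pvSection "% Walls" walls
    ++ pvSection "% Stations" stations
    ++ pvSection "% Taxis" taxis
    ++ pvSection "% Passengers" passengers
  PySem.Str.join "\n" lines

-- ===== PRECONDITION & SPEC =====
def Spec_generate_facts (rows : Int) (cols : Int) (grid : List String) (out : String) : Prop := out = generate_facts_alt rows cols grid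
instance (rows : Int) (cols : Int) (grid : List String) (out : String) : Decidable (Spec_generate_facts rows cols grid out) := by unfold Spec_generate_facts; infer_instance

-- ===== CLAIM (what is proved, stated in full; the proofs are below) =====
def Claim_equal_generate_facts : Prop := ∀ (rows : Int) (cols : Int) (grid : List String), Dom_generate_facts rows cols grid → Spec_generate_facts rows cols grid (generate_facts rows cols grid)

-- ===== LEMMAS AND PROOFS =====

-- the four section scans of B, as functions of the cell list
def pvW (L : List (Int × Int × Char)) : List String :=
  L.filterMap (fun t => if t.2.2 = '#' then some (pvWall t.1 t.2.1) else none)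
def pvS (L : List (Int × Int × Char)) : List String :=
  L.filterMap (fun t => if t.2.2 = 'X' then some (pvStation t.1 t.2.1) else none)
def pvT (L : List (Int × Int × Char)) : List String :=
  L.flatMap (fun t => if '1' ≤ t.2.2 ∧ t.2.2 ≤ '9' then [pvTaxi t.2.2, pvTaxiAt t.2.2 t.1 t.2.1] else [])
def pvP (L : List (Int × Int × Char)) : List String :=
  L.flatMap (fun t => if 'a' ≤ t.2.2 ∧ t.2.2 ≤ 'z' then [pvPassenger t.2.2, pvPassengerAt t.2.2 t.1 t.2.1] else [])

-- A's combined fold over any cell list = the initial state extended by B's four scans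
theorem pvFold_eq (L : List (Int × Int × Char)) (ws ss ts ps : List String) :
    L.foldl (fun st t => pvCellStep st t.1 t.2.1 t.2.2) (ws, ss, ts, ps)
      = (ws ++ pvW L, ss ++ pvS L, ts ++ pvT L, ps ++ pvP L) := by
  induction L generalizing ws ss ts ps with
  | nil => simp [pvW, pvS, pvT, pvP]
  | cons t L ih =>
    obtain ⟨x, y, ch⟩ := t
    by_cases h1 : ch = '#'
    · subst h1
      have hstep : pvCellStep (ws, ss, ts, ps) x y '#' = (ws ++ [pvWall x y], ss, ts, ps) := by
        simp [pvCellStep]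
      simp only [List.foldl_cons, hstep, ih]
      simp [pvW, pvS, pvT, pvP]
    · by_cases h2 : ch = 'X'
      · subst h2
        have hstep : pvCellStep (ws, ss, ts, ps) x y 'X' = (ws, ss ++ [pvStation x y], ts, ps) := by
          simp [pvCellStep]
        simp only [List.foldl_cons, hstep, ih]
        simp [pvW, pvS, pvT, pvP]
      · by_cases h3 : 'a' ≤ ch ∧ ch ≤ 'z'
        · have h4 : ¬('1' ≤ ch ∧ ch ≤ '9') := fun h4 =>
            absurd (le_trans h3.1 h4.2) (by decide)
          have hstep : pvCellStep (ws, ss, ts, ps) x y ch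
              = (ws, ss, ts, ps ++ [pvPassenger ch, pvPassengerAt ch x y]) := by
            simp [pvCellStep, h1, h2, h3]
          simp only [List.foldl_cons, hstep, ih]
          simp [pvW, pvS, pvT, pvP, h1, h2, h3, h4]
        · by_cases h4 : '1' ≤ ch ∧ ch ≤ '9'
          · have hstep : pvCellStep (ws, ss, ts, ps) x y ch
                = (ws, ss, ts ++ [pvTaxi ch, pvTaxiAt ch x y], ps) := by
              simp [pvCellStep, h1, h2, h3, h4]
            simp only [List.foldl_cons, hstep, ih]
            simp [pvW, pvS, pvT, pvP, h1, h2, h3, h4]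
          · have hstep : pvCellStep (ws, ss, ts, ps) x y ch = (ws, ss, ts, ps) := by
              simp [pvCellStep, h1, h2, h3, h4]
            simp only [List.foldl_cons, hstep, ih]
            simp [pvW, pvS, pvT, pvP, h1, h2, h3, h4]

-- ===== VERDICT (by name: the statement is the Claim_ definition above) =====
theorem generate_facts_spec : Claim_equal_generate_facts := by
  intro rows cols grid _
  show generate_facts rows cols grid = generate_facts_alt rows cols grid
  unfold generate_facts generate_facts_alt
  have hfold :
      (PySem.List.enumerate grid).foldl (fun st rl =>
        (PySem.List.enumerate rl.2.toList).foldl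
          (fun st cc => pvCellStep st (rl.1 + 1) (cc.1 + 1) cc.2) st)
        (([], [], [], []) : List String × List String × List String × List String)
      = (pvW (pvCells grid), pvS (pvCells grid), pvT (pvCells grid), pvP (pvCells grid)) := by
    have := pvFold_eq (pvCells grid) [] [] [] []
    simp only [List.nil_append] at this
    rw [← this]
    unfold pvCells
    rw [List.foldl_flatMap]
    simp [List.foldl_map]
  rw [hfold]
  simp only [pvW, pvS, pvT, pvP, pvSection]
  split_ifs <;> simp [List.append_assoc]
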